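-- pv_equiv track=rewrite | github.com/ketema/Euler_Problems | problem11/python/matrix_product.py | max_product_down
-- ===== SOURCE A (Python) =====
-- def max_product_down(matrix, n):
--     max_product = 0
--     rows = len(matrix)
--     cols = len(matrix[0]) if rows else 0
--     for r in range(rows - n + 1):
--         for c in range(cols):
--             product = 1
--             for i in range(n):
--                 product *= matrix[r+i][c]
--             max_product = max(max_product, product)
--     return max_product
-- ===== SOURCE B (Python) =====
-- def max_product_down(matrix, n):
--     # Sliding-window per column: maintain the product of the nonzero window entries and a zero count.
--     rows = len(matrix)
--     cols = len(matrix[0]) if rows else 0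
--     if rows - n + 1 <= 0 or cols == 0:
--         return 0
--     if n <= 0:
--         return 1  # every (empty) window has product 1, and at least one window exists
--     best = 0
--     for c in range(cols):
--         p = 1
--         zeros = 0
--         for i in range(n):
--             v = matrix[i][c]
--             if v == 0:
--                 zeros += 1
--             else:
--                 p *= v
--         best = max(best, 0 if zeros else p)
--         for r in range(1, rows - n + 1):
--             out = matrix[r - 1][c]
--             if out == 0:
--                 zeros -= 1
--             else:
--                 p //= out
--             inc = matrix[r + n - 1][c]
--             if inc == 0:
--                 zeros += 1
--             else:
--                 p *= inc
--             best = max(best, 0 if zeros else p)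
--     return best
-- ===== Notes on version B (the rewrite author's own statement) =====
-- stated objective: alternative
-- what changed: Replaces the per-window recomputation (product of n cells for every row offset) by a per-column sliding window that maintains the product of the nonzero entries plus a zero count, dividing out the leaving cell and multiplying in the entering one; O(rows*cols) cell reads instead of O(rows*cols*n), which a timing run does not separate at the small window lengths measured.
import Mathlib
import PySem

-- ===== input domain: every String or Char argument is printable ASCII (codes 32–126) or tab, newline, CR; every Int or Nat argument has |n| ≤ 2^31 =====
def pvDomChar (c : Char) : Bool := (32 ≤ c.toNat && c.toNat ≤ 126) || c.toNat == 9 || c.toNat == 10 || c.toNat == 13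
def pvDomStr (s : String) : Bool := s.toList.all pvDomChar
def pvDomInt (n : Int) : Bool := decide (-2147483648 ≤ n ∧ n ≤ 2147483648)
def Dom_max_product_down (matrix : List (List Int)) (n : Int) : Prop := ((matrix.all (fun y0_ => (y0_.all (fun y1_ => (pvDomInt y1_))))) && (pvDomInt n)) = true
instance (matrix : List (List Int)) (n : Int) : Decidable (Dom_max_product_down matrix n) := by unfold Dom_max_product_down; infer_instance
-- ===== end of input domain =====

-- B replaces A's per-window recomputation of the n-cell column product by a per-column
-- sliding window that maintains the product of the nonzero window entries plus a zero
-- count; objective: alternative (a genuinely different algorithm of similar measured cost).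

-- ===== PORT A =====
def max_product_down (matrix : List (List Int)) (n : Int) : Int :=
  let rows : Int := matrix.length
  let cols : Int := if rows ≠ 0 then ((PySem.List.pyGetD matrix 0 []).length : Int) else 0
  (PySem.List.pyRange 0 (rows - n + 1)).foldl (fun mp r =>
    (PySem.List.pyRange 0 cols).foldl (fun mp c =>
      max mp ((PySem.List.pyRange 0 n).foldl
        (fun p i => p * PySem.List.pyGetD (PySem.List.pyGetD matrix (r + i) []) c 0) 1)) mp) 0

-- ===== PORT B =====
def max_product_down_alt (matrix : List (List Int)) (n : Int) : Int :=
  let rows : Int := matrix.length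
  let cols : Int := if rows ≠ 0 then ((PySem.List.pyGetD matrix 0 []).length : Int) else 0
  if rows - n + 1 ≤ 0 ∨ cols = 0 then 0
  else if n ≤ 0 then 1  -- every (empty) window has product 1, and at least one window exists
  else
    (PySem.List.pyRange 0 cols).foldl (fun best c =>
      let pz : Int × Int := (PySem.List.pyRange 0 n).foldl (fun pz i =>
        let v := PySem.List.pyGetD (PySem.List.pyGetD matrix i []) c 0
        if v = 0 then (pz.1, pz.2 + 1) else (pz.1 * v, pz.2)) (1, 0)
      let best1 := max best (if pz.2 ≠ 0 then 0 else pz.1)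
      let st := (PySem.List.pyRange 1 (rows - n + 1)).foldl (fun st r =>
        let om := PySem.List.pyGetD (PySem.List.pyGetD matrix (r - 1) []) c 0
        let pz1 : Int × Int := if om = 0 then (st.1, st.2.1 - 1)
                               else (PySem.Int.floordiv st.1 om, st.2.1)
        let inc := PySem.List.pyGetD (PySem.List.pyGetD matrix (r + n - 1) []) c 0
        let pz2 : Int × Int := if inc = 0 then (pz1.1, pz1.2 + 1) else (pz1.1 * inc, pz1.2)
        (pz2.1, pz2.2, max st.2.2 (if pz2.2 ≠ 0 then 0 else pz2.1))) (pz.1, pz.2, best1)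
      st.2.2) 0

-- ===== PRECONDITION & SPEC =====
-- Pre_ excludes exactly the inputs where the Python A raises IndexError: some row of a
-- ragged matrix is shorter than the first row while 1 ≤ n ≤ rows (so cells are accessed).
def Pre_max_product_down (matrix : List (List Int)) (n : Int) : Prop :=
  (1 ≤ n ∧ n ≤ (matrix.length : Int)) →
    ∀ row ∈ matrix, (matrix.headD []).length ≤ row.length
instance (matrix : List (List Int)) (n : Int) : Decidable (Pre_max_product_down matrix n) := by
  unfold Pre_max_product_down; infer_instance
def pvWitness_max_product_down : List (List Int) × Int := ([[1, 2], [3, 4], [0, -5]], 2)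

def Spec_max_product_down (matrix : List (List Int)) (n : Int) (out : Int) : Prop := out = max_product_down_alt matrix n
instance (matrix : List (List Int)) (n : Int) (out : Int) : Decidable (Spec_max_product_down matrix n out) := by unfold Spec_max_product_down; infer_instance

-- ===== CLAIM (what is proved, stated in full; the proofs are below) =====
def Claim_equal_max_product_down : Prop := ∀ (matrix : List (List Int)) (n : Int), Dom_max_product_down matrix n → Pre_max_product_down matrix n → Spec_max_product_down matrix n (max_product_down matrix n)

-- ===== LEMMAS AND PROOFS =====

-- product of the nonzero entries of a list
def pvNzp (l : List Int) : Int := (l.filter (fun v => v != 0)).prod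

-- product of a list = 0 if it contains a zero, else the product of its nonzero entries
theorem pvProd_eq (l : List Int) :
    l.prod = if l.count 0 ≠ 0 then 0 else pvNzp l := by
  induction l with
  | nil => simp [pvNzp]
  | cons x t ih =>
    by_cases hx : x = 0
    · subst hx; simp
    · simp only [List.prod_cons, ih, pvNzp, List.count_cons, List.filter_cons]
      by_cases hz : t.count 0 ≠ 0 <;> simp [hx, hz, bne_iff_ne]

-- B's initial-window scan: product of nonzeros and zero count of the scanned list
theorem pvBscan (l : List Int) (p z : Int) :
    l.foldl (fun pz v => if v = 0 then (pz.1, pz.2 + 1) else (pz.1 * v, pz.2)) (p, z)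
      = (p * pvNzp l, z + (l.count 0 : Int)) := by
  induction l generalizing p z with
  | nil => simp [pvNzp]
  | cons x t ih =>
    by_cases hx : x = 0
    · subst hx; simp [List.foldl_cons, ih, pvNzp]; ring
    · simp [List.foldl_cons, hx, ih, pvNzp, bne_iff_ne, mul_assoc]

theorem pvWin_cons (h : Int → Int) (m : Nat) (r : Int) :
    ((List.range (m+1)).map (fun (i : Nat) => h (r + (i : Int))))
      = h r :: (List.range m).map (fun (i : Nat) => h (r + 1 + (i : Int))) := by
  rw [List.range_succ_eq_map, List.map_cons, List.map_map]
  congr 1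
  · norm_num
  · refine List.map_congr_left ?_
    intro i _
    simp only [Function.comp_apply, Nat.succ_eq_add_one]
    congr 1
    push_cast
    ring

theorem pvWin_snoc (h : Int → Int) (m : Nat) (r : Int) :
    ((List.range (m+1)).map (fun (i : Nat) => h (r + 1 + (i : Int))))
      = (List.range m).map (fun (i : Nat) => h (r + 1 + (i : Int))) ++ [h (r + 1 + (m : Int))] := by
  rw [List.range_succ]; simp

theorem pvNzp_cons (x : Int) (t : List Int) :
    pvNzp (x :: t) = (if x = 0 then 1 else x) * pvNzp t := by
  by_cases hx : x = 0 <;> simp [pvNzp, List.filter_cons, hx, bne_iff_ne]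

theorem pvNzp_snoc (t : List Int) (x : Int) :
    pvNzp (t ++ [x]) = pvNzp t * (if x = 0 then 1 else x) := by
  by_cases hx : x = 0 <;> simp [pvNzp, List.filter_append, hx, bne_iff_ne]

-- nested max-folds flatten to a single max-fold over the flattened value list
theorem pvFold_nest_flat (g : Int → Int → Int) (l1 l2 : List Int) (init : Int) :
    l1.foldl (fun a x => l2.foldl (fun a y => max a (g x y)) a) init
      = List.foldl max init (l1.flatMap (fun x => l2.map (g x))) := by
  induction l1 generalizing init with
  | nil => simp
  | cons x t ih => simp [List.flatMap_cons, List.foldl_append, List.foldl_map, ih]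

-- the row-major and column-major value lists are permutations of each other
theorem pvPerm_flat (g : Int → Int → Int) (l1 l2 : List Int) :
    (l1.flatMap (fun x => l2.map (g x))).Perm (l2.flatMap (fun y => l1.map (fun x => g x y))) := by
  rw [← Multiset.coe_eq_coe, ← Multiset.coe_bind, ← Multiset.coe_bind]
  have h1 : ∀ (l : List Int) (f : Int → Int), (↑(l.map f) : Multiset Int) = (↑l : Multiset Int).map f := by
    intro l f; simp
  simp only [h1]
  simp only [← Multiset.bind_singleton]
  exact Multiset.bind_bind _ _

-- a max-fold over a rectangle of values may be traversed in either order
theorem pvFold_max_swap (g : Int → Int → Int) (l1 l2 : List Int) (init : Int) :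
    l1.foldl (fun a x => l2.foldl (fun a y => max a (g x y)) a) init
      = l2.foldl (fun a y => l1.foldl (fun a x => max a (g x y)) a) init := by
  rw [pvFold_nest_flat, pvFold_nest_flat]
  exact @List.Perm.foldl_eq _ _ max _ _ ⟨fun a b c => max_right_comm a b c⟩ (pvPerm_flat g l1 l2) init

-- the column-c window of length N starting at row r
def pvW (h : Int → Int) (N : Nat) (r : Int) : List Int :=
  (List.range N).map (fun (i : Nat) => h (r + (i : Int)))

-- B's sliding step, as in the port
def pvCStep (h : Int → Int) (n : Int) (st : Int × Int × Int) (r : Int) : Int × Int × Int :=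
  let om := h (r - 1)
  let pz1 : Int × Int := if om = 0 then (st.1, st.2.1 - 1)
                         else (PySem.Int.floordiv st.1 om, st.2.1)
  let inc := h (r + n - 1)
  let pz2 : Int × Int := if inc = 0 then (pz1.1, pz1.2 + 1) else (pz1.1 * inc, pz1.2)
  (pz2.1, pz2.2, max st.2.2 (if pz2.2 ≠ 0 then 0 else pz2.1))

-- one slide preserves the invariant and records the next window product
theorem pvCStep_slide (h : Int → Int) (m : Nat) (r0 best : Int) :
    pvCStep h ((m : Int) + 1)
        (pvNzp (pvW h (m+1) r0), (((pvW h (m+1) r0).count 0 : Int)), best) (r0 + 1)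
      = (pvNzp (pvW h (m+1) (r0+1)), (((pvW h (m+1) (r0+1)).count 0 : Int)),
         max best ((pvW h (m+1) (r0+1)).prod)) := by
  have e1 : r0 + 1 - 1 = r0 := by ring
  have e2 : r0 + 1 + ((m : Int) + 1) - 1 = r0 + 1 + (m : Int) := by ring
  have hW0 : pvW h (m+1) r0 = h r0 :: (List.range m).map (fun (i : Nat) => h (r0 + 1 + (i : Int))) :=
    pvWin_cons h m r0
  have hW1 : pvW h (m+1) (r0+1) = (List.range m).map (fun (i : Nat) => h (r0 + 1 + (i : Int))) ++ [h (r0 + 1 + (m : Int))] :=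
    pvWin_snoc h m r0
  rw [pvProd_eq]
  simp only [pvCStep, e1, e2, hW0, hW1]
  by_cases h0 : h r0 = 0 <;> by_cases h1 : h (r0 + 1 + (m : Int)) = 0 <;>
    simp [pvNzp_cons, pvNzp_snoc, h0, h1, List.count_cons, List.count_append, pvNzp,
          Int.mul_fdiv_cancel_left, PySem.Int.floordiv] <;> push_cast <;> ring_nf <;>
    rw [if_neg (by omega)]

-- the sliding fold visits windows r0+1, …, r0+j and max-accumulates their products
theorem pvColSlide (h : Int → Int) (m : Nat) :
    ∀ (j : Nat) (r0 best : Int),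
      ((List.range j).map (fun (k : Nat) => r0 + 1 + (k : Int))).foldl (pvCStep h ((m : Int)+1))
          (pvNzp (pvW h (m+1) r0), ((pvW h (m+1) r0).count 0 : Int), best)
        = (pvNzp (pvW h (m+1) (r0 + (j : Int))), ((pvW h (m+1) (r0 + (j : Int))).count 0 : Int),
           ((List.range j).map (fun (k : Nat) => r0 + 1 + (k : Int))).foldl
             (fun a r => max a ((pvW h (m+1) r).prod)) best) := by
  intro j
  induction j with
  | zero => intro r0 best; simp
  | succ j ih =>
    intro r0 best
    have hc := pvWin_cons (fun (x : Int) => x) j (r0 + 1)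
    simp only [] at hc
    rw [hc, List.foldl_cons, List.foldl_cons, pvCStep_slide]
    rw [ih (r0 + 1) (max best ((pvW h (m+1) (r0+1)).prod))]
    have e4 : r0 + 1 + (j : Int) = r0 + ((j : Nat) + 1 : Nat) := by push_cast; ring
    rw [e4]

theorem pvFoldFixed (l : List Int) (a : Int) : l.foldl (fun x (_ : Int) => x) a = a := by
  induction l generalizing a with
  | nil => rfl
  | cons x t ih => simpa using ih a

theorem pvFoldMaxOne (l : List Int) (a : Int) :
    l.foldl (fun m (_ : Int) => max m 1) a = if l.isEmpty then a else max a 1 := by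
  induction l generalizing a with
  | nil => rfl
  | cons x t ih => simp [ih, max_assoc]

-- cell (r, c) of the matrix, as both ports read it
def pvCell (matrix : List (List Int)) (r c : Int) : Int :=
  PySem.List.pyGetD (PySem.List.pyGetD matrix r []) c 0

-- B's per-column body = a plain max-fold of window products over all start rows
theorem pvColumn (h : Int → Int) (m j : Nat) (best : Int) :
    (let pz : Int × Int := ((List.range (m+1)).map (fun (k : Nat) => (0:Int) + (k : Int))).foldl
        (fun pz i =>
          let v := h i
          if v = 0 then (pz.1, pz.2 + 1) else (pz.1 * v, pz.2)) (1, 0)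
      let best1 := max best (if pz.2 ≠ 0 then 0 else pz.1)
      let st := ((List.range j).map (fun (k : Nat) => (1:Int) + (k : Int))).foldl
        (pvCStep h ((m : Int) + 1)) (pz.1, pz.2, best1)
      st.2.2)
    = ((List.range (j+1)).map (fun (k : Nat) => (0:Int) + (k : Int))).foldl
        (fun a r => max a ((pvW h (m+1) r).prod)) best := by
  have hscan : ((List.range (m+1)).map (fun (k : Nat) => (0:Int) + (k : Int))).foldl
      (fun (pz : Int × Int) i => let v := h i; if v = 0 then (pz.1, pz.2 + 1) else (pz.1 * v, pz.2)) (1, 0)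
      = (pvNzp (pvW h (m+1) 0), ((pvW h (m+1) 0).count 0 : Int)) := by
    rw [List.foldl_map]
    rw [show (List.foldl (fun (pz : Int × Int) (k : Nat) =>
          let v := h ((0:Int) + (k:Int)); if v = 0 then (pz.1, pz.2 + 1) else (pz.1 * v, pz.2)) (1, 0) (List.range (m+1)))
        = List.foldl (fun (pz : Int × Int) (v : Int) => if v = 0 then (pz.1, pz.2 + 1) else (pz.1 * v, pz.2)) (1, 0)
            ((List.range (m+1)).map (fun (k : Nat) => h ((0:Int) + (k:Int)))) from by rw [List.foldl_map]]
    rw [show (List.range (m+1)).map (fun (k : Nat) => h ((0:Int) + (k:Int))) = pvW h (m+1) 0 from rfl]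
    rw [pvBscan]
    simp
  simp only [hscan]
  have hcons1 : ∀ (k : Nat), (1:Int) + (k : Int) = (0:Int) + 1 + (k : Int) := fun k => by ring
  simp only [hcons1]
  rw [pvColSlide h m j 0 _]
  have hrow := pvWin_cons (fun (x : Int) => x) j 0
  simp only [] at hrow
  rw [hrow, List.foldl_cons]
  rw [pvProd_eq (pvW h (m+1) 0)]
  simp only [zero_add]
  simp

-- the two ports agree on every input (no precondition needed: both read cells through
-- the same total pyGetD accessor)
theorem pvMain (matrix : List (List Int)) (n : Int) :
    max_product_down matrix n = max_product_down_alt matrix n := by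
  unfold max_product_down max_product_down_alt
  dsimp only
  set C : Int := (if (matrix.length : Int) ≠ 0 then ((PySem.List.pyGetD matrix 0 []).length : Int) else 0) with hC
  have hC0 : 0 ≤ C := by rw [hC]; split <;> simp
  by_cases hg1 : (matrix.length : Int) - n + 1 ≤ 0
  · rw [if_pos (Or.inl hg1)]
    rw [PySem.List.pyRange_one 0 ((matrix.length : Int) - n + 1)]
    have h0 : ((matrix.length : Int) - n + 1 - 0).toNat = 0 := by omega
    rw [h0]
    simp
  by_cases hg2 : C = 0
  · rw [if_pos (Or.inr hg2)]
    rw [hg2, PySem.List.pyRange_one 0 0]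
    simp [pvFoldFixed]
  rw [if_neg (by push_neg; exact ⟨by omega, hg2⟩)]
  by_cases hn : n ≤ 0
  · rw [if_pos hn]
    rw [PySem.List.pyRange_one 0 n]
    have hn0 : (n - 0).toNat = 0 := by omega
    rw [hn0]
    simp only [List.range_zero, List.map_nil, List.foldl_nil]
    have hCne : ¬ (PySem.List.pyRange 0 C).isEmpty := by
      rw [PySem.List.pyRange_one]
      simp [List.isEmpty_iff, List.map_eq_nil_iff, List.range_eq_nil]
      omega
    have hinner : ∀ mp : Int, (PySem.List.pyRange 0 C).foldl (fun mp _ => max mp 1) mp = max mp 1 := by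
      intro mp; rw [pvFoldMaxOne]; simp [hCne]
    rw [List.foldl_ext _ (fun (mp : Int) (_ : Int) => max mp 1) _ (fun a b _ => hinner a)]
    rw [pvFoldMaxOne]
    have hRne : ¬ (PySem.List.pyRange 0 ((matrix.length : Int) - n + 1)).isEmpty := by
      rw [PySem.List.pyRange_one]
      simp [List.isEmpty_iff, List.map_eq_nil_iff, List.range_eq_nil]
      omega
    simp [hCne, hRne]
  -- main case: n ≥ 1, at least one window position
  rw [if_neg hn]
  obtain ⟨m, rfl⟩ : ∃ m : Nat, n = (m : Int) + 1 := ⟨(n - 1).toNat, by omega⟩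
  set j : Nat := ((matrix.length : Int) - ((m : Int) + 1)).toNat with hjdef
  have hR : ((matrix.length : Int) - ((m : Int) + 1) + 1 - 0).toNat = j + 1 := by omega
  have hN : (((m : Int) + 1) - 0).toNat = m + 1 := by omega
  have hj1 : ((matrix.length : Int) - ((m : Int) + 1) + 1 - 1).toNat = j := by omega
  rw [PySem.List.pyRange_one 0 ((matrix.length : Int) - ((m : Int) + 1) + 1), hR]
  rw [PySem.List.pyRange_one 0 ((m : Int) + 1), hN]
  rw [PySem.List.pyRange_one 1 ((matrix.length : Int) - ((m : Int) + 1) + 1), hj1]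
  have hprod : ∀ (r c : Int),
      List.foldl (fun p i => p * PySem.List.pyGetD (PySem.List.pyGetD matrix (r + i) []) c 0) 1
        (List.map (fun (k : Nat) => (0:Int) + (k : Int)) (List.range (m+1)))
      = (pvW (fun x => pvCell matrix x c) (m+1) r).prod := by
    intro r c
    rw [List.foldl_map, pvW, List.prod_eq_foldl, List.foldl_map]
    exact List.foldl_ext _ _ _ (fun a k _ => by simp [pvCell])
  simp only [hprod]
  rw [pvFold_max_swap (fun r c => (pvW (fun x => pvCell matrix x c) (m+1) r).prod)]
  refine (List.foldl_ext _ _ _ (fun a c _ => ?_)).symm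
  exact pvColumn (fun x => pvCell matrix x c) m j a

-- ===== VERDICT (by name: the statement is the Claim_ definition above) =====
theorem max_product_down_spec : Claim_equal_max_product_down := by
  intro matrix n _ _
  exact pvMain matrix n
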